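-- pv_equiv track=rewrite | github.com/xingyug/service2mcp | libs/generator/generic_mode.py | _sanitize_dns_label
-- ===== SOURCE A (Python) =====
-- _MAX_RESOURCE_NAME_LENGTH = 63
--
-- def _sanitize_dns_label(value: str) -> str:
--     sanitized = []
--     previous_was_dash = False
--     for char in value.lower():
--         if char.isalnum():
--             sanitized.append(char)
--             previous_was_dash = False
--             continue
--         if previous_was_dash:
--             continue
--         sanitized.append("-")
--         previous_was_dash = True
--
--     label = "".join(sanitized).strip("-")
--     if not label:
--         label = "service"
--     return label[:_MAX_RESOURCE_NAME_LENGTH].rstrip("-")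
-- ===== SOURCE B (Python) =====
-- _MAX_RESOURCE_NAME_LENGTH = 63
--
-- def _sanitize_dns_label(value: str) -> str:
--     spaced = "".join(ch if ch.isalnum() else " " for ch in value.lower())
--     label = "-".join(spaced.split())
--     if not label:
--         label = "service"
--     return label[:_MAX_RESOURCE_NAME_LENGTH].rstrip("-")
-- ===== Notes on version B (the rewrite author's own statement) =====
-- stated objective: idiomatic
-- what changed: Replaces the stateful previous_was_dash run-collapsing loop with mapping every non-alphanumeric character to a space and then splitting on whitespace and joining the tokens with dashes, which drops leading/trailing separators and collapses runs by construction; the empty-label fallback, truncation and trailing-dash strip tail is kept.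
import Mathlib
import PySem

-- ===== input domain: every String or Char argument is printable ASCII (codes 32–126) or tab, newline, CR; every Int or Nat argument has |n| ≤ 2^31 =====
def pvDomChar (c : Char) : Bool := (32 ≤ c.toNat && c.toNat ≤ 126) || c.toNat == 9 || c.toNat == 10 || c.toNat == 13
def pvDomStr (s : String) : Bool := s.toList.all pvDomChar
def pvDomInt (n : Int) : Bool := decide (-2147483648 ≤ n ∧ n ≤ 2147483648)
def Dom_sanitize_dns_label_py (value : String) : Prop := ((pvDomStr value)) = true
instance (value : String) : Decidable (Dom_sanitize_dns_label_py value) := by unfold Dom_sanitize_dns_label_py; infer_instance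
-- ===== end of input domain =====

-- B replaces A's stateful previous_was_dash run-collapsing loop with map-to-space + split()/join() boundary logic (idiomatic; same cost).

-- hand port of str.rstrip(chars) (PySem provides only two-sided stripChars); exact: it is the
-- right half of PySem.Chars.stripChars's definition. Both Pythons call .rstrip("-") verbatim.
def pyRstripChars (s chars : List Char) : List Char :=
  (List.dropWhile (fun c => chars.contains c) s.reverse).reverse

-- ===== PORT A =====
def sanitize_dns_label_py (value : String) : String :=
  let sanitized := ((PySem.Chars.lower value.toList).foldl
    (fun (st : List Char × Bool) c =>
      if PySem.Chars.isalnum c then (st.1 ++ [c], false)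
      else if st.2 then st
      else (st.1 ++ ['-'], true)) ([], false)).1
  let label := PySem.Chars.stripChars sanitized ['-']
  let label := if label.isEmpty then "service".toList else label
  String.ofList (pyRstripChars (PySem.List.slice label none (some 63)) ['-'])

-- ===== PORT B =====
def sanitize_dns_label_py_alt (value : String) : String :=
  let spaced := (PySem.Chars.lower value.toList).map
    (fun c => if PySem.Chars.isalnum c then c else ' ')
  let label := PySem.Chars.join ['-'] (PySem.Chars.split₀ spaced)
  let label := if label.isEmpty then "service".toList else label
  String.ofList (pyRstripChars (PySem.List.slice label none (some 63)) ['-'])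

-- ===== PRECONDITION & SPEC =====
def Spec_sanitize_dns_label_py (value : String) (out : String) : Prop := out = sanitize_dns_label_py_alt value
instance (value : String) (out : String) : Decidable (Spec_sanitize_dns_label_py value out) := by unfold Spec_sanitize_dns_label_py; infer_instance

-- ===== CLAIM (what is proved, stated in full; the proofs are below) =====
def Claim_equal_sanitize_dns_label_py : Prop := ∀ (value : String), Dom_sanitize_dns_label_py value → Spec_sanitize_dns_label_py value (sanitize_dns_label_py value)

-- ===== LEMMAS AND PROOFS =====

-- A's loop body as a structural recursion on the remaining characters (proof-side view of the fold).
def outA : List Char → Bool → List Char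
  | [], _ => []
  | c :: r, pwd =>
    if PySem.Chars.isalnum c then c :: outA r false
    else if pwd then outA r true
    else '-' :: outA r true

-- final previous_was_dash state of A's loop
def pwdEnd : List Char → Bool → Bool
  | [], pwd => pwd
  | c :: r, _ => if PySem.Chars.isalnum c then pwdEnd r false else pwdEnd r true

-- maximal alnum runs of cs, in order
def wordsB : List Char → List (List Char)
  | [] => []
  | c :: r =>
    if PySem.Chars.isalnum c then
      (c :: r.takeWhile PySem.Chars.isalnum) :: wordsB (r.dropWhile PySem.Chars.isalnum)
    else wordsB r
termination_by cs => cs.length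
decreasing_by
  · simpa using Nat.lt_succ_of_le (List.length_dropWhile_le _ _)
  · simp

def leadD : List Char → List Char
  | [] => []
  | c :: _ => if PySem.Chars.isalnum c then [] else ['-']

def trailD (cs : List Char) : List Char :=
  if wordsB cs = [] then []
  else match cs.getLast? with
    | none => []
    | some c => if PySem.Chars.isalnum c then [] else ['-']

theorem foldA (cs : List Char) (acc : List Char) (pwd : Bool) :
    cs.foldl (fun (st : List Char × Bool) c =>
      if PySem.Chars.isalnum c then (st.1 ++ [c], false)
      else if st.2 then st
      else (st.1 ++ ['-'], true)) (acc, pwd) = (acc ++ outA cs pwd, pwdEnd cs pwd) := by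
  induction cs generalizing acc pwd with
  | nil => simp [outA, pwdEnd]
  | cons c r ih =>
    by_cases h : PySem.Chars.isalnum c = true
    · simp [outA, pwdEnd, h, ih]
    · cases pwd <;> simp [outA, pwdEnd, h, ih]

theorem alnum_not_space (c : Char) (h : PySem.Chars.isalnum c = true) :
    PySem.Chars.isspace c = false := by
  simp only [PySem.Chars.isalnum, PySem.Chars.isalpha, PySem.Chars.isdigit,
    PySem.Chars.isupper, PySem.Chars.islower, Bool.or_eq_true, Bool.and_eq_true,
    decide_eq_true_eq] at h
  have h' : (48 ≤ c.toNat ∧ c.toNat ≤ 57) ∨ (65 ≤ c.toNat ∧ c.toNat ≤ 90) ∨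
      (97 ≤ c.toNat ∧ c.toNat ≤ 122) := by
    rcases h with (⟨h1, h2⟩ | ⟨h1, h2⟩) | ⟨h1, h2⟩
    · exact Or.inr (Or.inl ⟨h1, h2⟩)
    · exact Or.inr (Or.inr ⟨h1, h2⟩)
    · exact Or.inl ⟨h1, h2⟩
  simp only [PySem.Chars.isspace, Bool.or_eq_false_iff, Bool.and_eq_false_iff,
    decide_eq_false_iff_not]
  omega

theorem alnum_not_dash (c : Char) (h : PySem.Chars.isalnum c = true) :
    (['-'] : List Char).contains c = false := by
  by_cases hc : c = '-'
  · subst hc; exact absurd h (by decide)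
  · simpa using hc

-- B's split over the spaced string computes wordsB
theorem go_spec (cs : List Char) (cur : List Char) (acc : List (List Char)) :
    PySem.Chars.split₀.go (cs.map (fun c => if PySem.Chars.isalnum c then c else ' ')) cur acc =
      acc.reverse ++ (if cur = [] then wordsB cs
        else (cur.reverse ++ cs.takeWhile PySem.Chars.isalnum) ::
          wordsB (cs.dropWhile PySem.Chars.isalnum)) := by
  induction cs generalizing cur acc with
  | nil =>
    cases cur with
    | nil => simp [PySem.Chars.split₀.go, wordsB]
    | cons x t => simp [PySem.Chars.split₀.go, wordsB]
  | cons c r ih =>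
    by_cases h : PySem.Chars.isalnum c = true
    · have hns : PySem.Chars.isspace c = false := alnum_not_space c h
      have hsp : (if PySem.Chars.isalnum c then c else ' ') = c := by simp [h]
      cases cur with
      | nil =>
        simp only [List.map_cons, hsp]
        rw [show PySem.Chars.split₀.go
              (c :: r.map (fun c => if PySem.Chars.isalnum c then c else ' ')) [] acc =
            PySem.Chars.split₀.go
              (r.map (fun c => if PySem.Chars.isalnum c then c else ' ')) [c] acc by
          simp [PySem.Chars.split₀.go, hns]]
        rw [ih]
        simp [wordsB, h]
      | cons x t =>
        simp only [List.map_cons, hsp]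
        rw [show PySem.Chars.split₀.go
              (c :: r.map (fun c => if PySem.Chars.isalnum c then c else ' ')) (x :: t) acc =
            PySem.Chars.split₀.go
              (r.map (fun c => if PySem.Chars.isalnum c then c else ' ')) (c :: x :: t) acc by
          simp [PySem.Chars.split₀.go, hns]]
        rw [ih]
        simp [h]
    · have hsp : (if PySem.Chars.isalnum c then c else ' ') = ' ' := by simp [h]
      cases cur with
      | nil =>
        simp only [List.map_cons, hsp]
        rw [show PySem.Chars.split₀.go
              (' ' :: r.map (fun c => if PySem.Chars.isalnum c then c else ' ')) [] acc =
            PySem.Chars.split₀.go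
              (r.map (fun c => if PySem.Chars.isalnum c then c else ' ')) [] acc by
          simp [PySem.Chars.split₀.go, show PySem.Chars.isspace ' ' = true from by decide]]
        rw [ih]
        simp [wordsB, h]
      | cons x t =>
        simp only [List.map_cons, hsp]
        rw [show PySem.Chars.split₀.go
              (' ' :: r.map (fun c => if PySem.Chars.isalnum c then c else ' ')) (x :: t) acc =
            PySem.Chars.split₀.go
              (r.map (fun c => if PySem.Chars.isalnum c then c else ' ')) []
              (((x :: t).reverse) :: acc) by
          simp [PySem.Chars.split₀.go, show PySem.Chars.isspace ' ' = true from by decide]]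
        rw [ih]
        simp [wordsB, h]

theorem split₀_words (cs : List Char) :
    PySem.Chars.split₀ (cs.map (fun c => if PySem.Chars.isalnum c then c else ' ')) = wordsB cs := by
  simp [PySem.Chars.split₀, go_spec]

theorem words_prop (cs : List Char) :
    ∀ w ∈ wordsB cs, w ≠ [] ∧ ∀ c ∈ w, PySem.Chars.isalnum c = true := by
  induction cs using wordsB.induct with
  | case1 => simp [wordsB]
  | case2 c r h ih =>
    intro w hw
    rw [wordsB, if_pos h, List.mem_cons] at hw
    rcases hw with hw | hw
    · subst hw
      refine ⟨by simp, ?_⟩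
      intro x hx
      rw [List.mem_cons] at hx
      rcases hx with hx | hx
      · simpa [hx] using h
      · exact List.mem_takeWhile_imp hx
    · exact ih w hw
  | case3 c r h ih =>
    intro w hw
    rw [wordsB, if_neg h] at hw
    exact ih w hw

theorem words_nil_iff (cs : List Char) :
    wordsB cs = [] ↔ ∀ c ∈ cs, PySem.Chars.isalnum c = false := by
  induction cs using wordsB.induct with
  | case1 => simp [wordsB]
  | case2 c r h ih => simp [wordsB, h]
  | case3 c r h ih =>
    rw [wordsB, if_neg h, ih]
    constructor
    · intro hall x hx
      rw [List.mem_cons] at hx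
      rcases hx with hx | hx
      · subst hx; simpa using h
      · exact hall x hx
    · intro hall x hx
      exact hall x (List.mem_cons_of_mem _ hx)

-- A's loop, started with previous_was_dash = True seen from any point: words joined by dashes plus a possible trailing dash
theorem outA_true (cs : List Char) :
    outA cs true = PySem.Chars.join ['-'] (wordsB cs) ++ trailD cs := by
  induction cs with
  | nil => simp [outA, wordsB, trailD, PySem.Chars.join_nil]
  | cons c r ih =>
    by_cases h : PySem.Chars.isalnum c = true
    · -- outA (c::r) true = c :: outA r false, and outA r false = leadD r ++ outA r true
      have hfalse : outA r false = leadD r ++ outA r true := by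
        cases r with
        | nil => simp [outA, leadD]
        | cons d r' =>
          by_cases hd : PySem.Chars.isalnum d = true
          · simp [outA, leadD, hd]
          · simp [outA, leadD, hd]
      rw [show outA (c :: r) true = c :: outA r false by simp [outA, h], hfalse, ih]
      cases r with
      | nil =>
        simp [wordsB, trailD, h, PySem.Chars.join_nil, PySem.Chars.join_singleton, leadD]
      | cons d r' =>
        by_cases hd : PySem.Chars.isalnum d = true
        · -- first word extends
          have hw : wordsB (c :: d :: r') =
              (c :: d :: r'.takeWhile PySem.Chars.isalnum) ::
                wordsB (r'.dropWhile PySem.Chars.isalnum) := by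
            rw [wordsB, if_pos h, List.takeWhile_cons, List.dropWhile_cons]
            simp [hd]
          have hw' : wordsB (d :: r') =
              (d :: r'.takeWhile PySem.Chars.isalnum) ::
                wordsB (r'.dropWhile PySem.Chars.isalnum) := by
            rw [wordsB, if_pos hd]
          have htr : trailD (c :: d :: r') = trailD (d :: r') := by
            unfold trailD
            rw [hw, hw', List.getLast?_cons_cons]
            simp
          rw [hw, hw', htr, leadD]
          cases hws : wordsB (r'.dropWhile PySem.Chars.isalnum) with
          | nil => simp [PySem.Chars.join_singleton, hd]
          | cons v vs => simp [PySem.Chars.join_cons_cons, hd]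
        · -- first word is [c]
          have hw : wordsB (c :: d :: r') = [c] :: wordsB (d :: r') := by
            rw [wordsB, if_pos h, List.takeWhile_cons, List.dropWhile_cons]
            simp [hd]
          rw [hw, leadD, if_neg (by simp [hd])]
          cases hws : wordsB (d :: r') with
          | nil =>
            have hall := (words_nil_iff (d :: r')).mp hws
            have hlast : ∀ e, (d :: r').getLast? = some e → PySem.Chars.isalnum e = false := by
              intro e he
              exact hall e (List.mem_of_getLast? he)
            have htc : trailD (c :: d :: r') = ['-'] := by
              unfold trailD
              rw [hw, hws, List.getLast?_cons_cons]
              rcases List.getLast?_eq_some_iff.mpr ⟨(d :: r').dropLast, (List.dropLast_concat_getLast (by simp)).symm⟩ with he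
              rw [he]
              simp [hlast _ he]
            have htr : trailD (d :: r') = [] := by unfold trailD; rw [hws]; simp
            rw [htc, htr]
            simp [PySem.Chars.join_nil, PySem.Chars.join_singleton]
          | cons v vs =>
            have htr : trailD (c :: d :: r') = trailD (d :: r') := by
              unfold trailD
              rw [hw, hws, List.getLast?_cons_cons]
              simp
            rw [htr, PySem.Chars.join_cons_cons]
            simp
    · -- sep head: skipped
      rw [show outA (c :: r) true = outA r true by simp [outA, h], ih]
      have hw : wordsB (c :: r) = wordsB r := by rw [wordsB, if_neg h]
      have htr : trailD (c :: r) = trailD r := by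
        unfold trailD
        rw [hw]
        cases r with
        | nil => simp [wordsB]
        | cons d r' => rw [List.getLast?_cons_cons]
      rw [hw, htr]

theorem outA_false (cs : List Char) :
    outA cs false = leadD cs ++ PySem.Chars.join ['-'] (wordsB cs) ++ trailD cs := by
  have hfalse : outA cs false = leadD cs ++ outA cs true := by
    cases cs with
    | nil => simp [outA, leadD]
    | cons c r =>
      by_cases h : PySem.Chars.isalnum c = true
      · simp [outA, leadD, h]
      · simp [outA, leadD, h]
  rw [hfalse, outA_true]
  simp

theorem jn_no_strip (ws : List (List Char))
    (hws : ∀ w ∈ ws, w ≠ [] ∧ ∀ c ∈ w, PySem.Chars.isalnum c = true) :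
    (PySem.Chars.join ['-'] ws).dropWhile (fun c => (['-'] : List Char).contains c) =
        PySem.Chars.join ['-'] ws ∧
    (PySem.Chars.join ['-'] ws).reverse.dropWhile (fun c => (['-'] : List Char).contains c) =
        (PySem.Chars.join ['-'] ws).reverse := by
  induction ws with
  | nil => simp [PySem.Chars.join_nil]
  | cons w ws ih =>
    obtain ⟨hne, hall⟩ := hws w (by simp)
    obtain ⟨x, t, rfl⟩ := List.exists_cons_of_ne_nil hne
    cases ws with
    | nil =>
      rw [PySem.Chars.join_singleton]
      constructor
      · rw [List.dropWhile_cons, alnum_not_dash x (hall x (by simp))]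
        simp
      · have hlast : (x :: t).getLast (by simp) ∈ x :: t := List.getLast_mem _
        rw [show (x :: t).reverse = (x :: t).getLast (by simp) :: (x :: t).dropLast.reverse by
          conv_lhs => rw [← List.dropLast_concat_getLast (l := x :: t) (by simp)]
          simp]
        rw [List.dropWhile_cons, alnum_not_dash _ (hall _ hlast)]
        simp
    | cons v vs =>
      have ih' := ih (fun w hw => hws w (by simp [hw]))
      rw [PySem.Chars.join_cons_cons]
      have hjne : PySem.Chars.join ['-'] (v :: vs) ≠ [] := by
        obtain ⟨hvne, _⟩ := hws v (by simp)
        obtain ⟨y, s, hy⟩ := List.exists_cons_of_ne_nil hvne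
        cases vs with
        | nil => rw [PySem.Chars.join_singleton]; exact hvne
        | cons u us => rw [PySem.Chars.join_cons_cons, hy]; simp
      constructor
      · rw [show x :: t ++ ['-'] ++ PySem.Chars.join ['-'] (v :: vs) =
            x :: (t ++ ['-'] ++ PySem.Chars.join ['-'] (v :: vs)) by simp]
        rw [List.dropWhile_cons, alnum_not_dash x (hall x (by simp))]
        simp
      · rw [show (x :: t ++ ['-'] ++ PySem.Chars.join ['-'] (v :: vs)).reverse =
            (PySem.Chars.join ['-'] (v :: vs)).reverse ++ '-' :: (x :: t).reverse by simp]
        rw [List.dropWhile_append, ih'.2]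
        have hie : (PySem.Chars.join ['-'] (v :: vs)).reverse.isEmpty = false := by
          simp [hjne]
        rw [hie]
        simp

theorem jn_ne_nil (ws : List (List Char)) (hne : ws ≠ [])
    (hws : ∀ w ∈ ws, w ≠ []) : PySem.Chars.join ['-'] ws ≠ [] := by
  obtain ⟨w, rest, rfl⟩ := List.exists_cons_of_ne_nil hne
  obtain ⟨x, t, rfl⟩ := List.exists_cons_of_ne_nil (hws w (by simp))
  cases rest with
  | nil => rw [PySem.Chars.join_singleton]; simp
  | cons v vs => rw [PySem.Chars.join_cons_cons]; simp

theorem strip_sandwich (p : Char → Bool) (lead m trail : List Char)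
    (hl : ∀ c ∈ lead, p c = true) (ht : ∀ c ∈ trail, p c = true)
    (hm1 : m.dropWhile p = m) (hm2 : m.reverse.dropWhile p = m.reverse)
    (hmt : m = [] → trail = []) :
    (List.dropWhile p (List.dropWhile p (lead ++ m ++ trail)).reverse).reverse = m := by
  have hlead : List.dropWhile p lead = [] := List.dropWhile_eq_nil_iff.mpr (by
    intro c hc; simpa using hl c hc)
  cases hm : m with
  | nil =>
    subst hm
    rw [hmt rfl]
    simp only [List.append_nil]
    rw [hlead]
    simp
  | cons x t =>
    rw [← hm]
    have hmne : m ≠ [] := by rw [hm]; simp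
    have h1 : List.dropWhile p (lead ++ m ++ trail) = m ++ trail := by
      rw [List.append_assoc, List.dropWhile_append, hlead]
      simp only [List.isEmpty_nil]
      rw [List.dropWhile_append, hm1]
      simp [hmne]
    rw [h1]
    have htrail : List.dropWhile p trail.reverse = [] := List.dropWhile_eq_nil_iff.mpr (by
      intro c hc; exact ht c (by simpa using hc))
    rw [List.reverse_append, List.dropWhile_append, htrail]
    simp only [List.isEmpty_nil]
    rw [hm2]
    simp

theorem label_eq (cs : List Char) :
    PySem.Chars.stripChars
      ((cs.foldl (fun (st : List Char × Bool) c =>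
        if PySem.Chars.isalnum c then (st.1 ++ [c], false)
        else if st.2 then st
        else (st.1 ++ ['-'], true)) ([], false)).1) ['-'] =
    PySem.Chars.join ['-'] (PySem.Chars.split₀
      (cs.map (fun c => if PySem.Chars.isalnum c then c else ' '))) := by
  rw [foldA, split₀_words]
  simp only [List.nil_append]
  rw [outA_false]
  have hjn := jn_no_strip (wordsB cs) (words_prop cs)
  unfold PySem.Chars.stripChars
  apply strip_sandwich
  · intro c hc
    unfold leadD at hc
    cases cs with
    | nil => simp at hc
    | cons d r =>
      by_cases hd : PySem.Chars.isalnum d = true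
      · simp [hd] at hc
      · simp [hd] at hc
        simp [hc]
  · intro c hc
    unfold trailD at hc
    split at hc
    · simp at hc
    · split at hc
      · simp at hc
      · split at hc
        · simp at hc
        · simp at hc
          simp [hc]
  · exact hjn.1
  · exact hjn.2
  · intro hm
    unfold trailD
    by_cases hws : wordsB cs = []
    · simp [hws]
    · exact absurd hm (jn_ne_nil _ hws (fun w hw => (words_prop cs w hw).1))

-- ===== VERDICT (by name: the statement is the Claim_ definition above) =====
theorem sanitize_dns_label_py_spec : Claim_equal_sanitize_dns_label_py := by
  intro value _
  unfold Spec_sanitize_dns_label_py sanitize_dns_label_py sanitize_dns_label_py_alt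
  simp only [label_eq]
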